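-- pv_equiv track=rewrite | github.com/zmx4/MySteps | 打表/捐赠.py | max_parts
-- ===== SOURCE A (Python) =====
-- def max_parts(total):
--     # 生成7的幂直到超过总金额
--     powers_of_7 = []
--     power = 1
--     while power <= total:
--         powers_of_7.append(power)
--         power *= 7
--
--     # 从大到小排序
--     powers_of_7.reverse()
--
--     result = 0  # 总份数
--     for value in powers_of_7:
--         # 每种面值最多使用5个
--         count = min(5, total // value)
--         total -= count * value
--         result += count
--
--     # 检查是否能正好分配完
--     if total == 0:
--         return result
--     else:
--         return -1  # 无法正好分配
-- ===== SOURCE B (Python) =====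
-- def max_parts(total):
--     # Base-7 digit extraction, low-to-high: each digit is the count of that
--     # power used; a digit 6 exceeds the per-power cap of 5, so it's impossible.
--     if total < 0:
--         return -1
--     result = 0
--     while total > 0:
--         d = total % 7
--         if d == 6:
--             return -1
--         result += d
--         total //= 7
--     return result
-- ===== Notes on version B (the rewrite author's own statement) =====
-- stated objective: simpler
-- what changed: B extracts base-7 digits low-to-high with % and // and sums them (failing on a digit 6), instead of A's precomputed powers-of-7 list, reverse, and high-to-low greedy subtraction.
import Mathlib
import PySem

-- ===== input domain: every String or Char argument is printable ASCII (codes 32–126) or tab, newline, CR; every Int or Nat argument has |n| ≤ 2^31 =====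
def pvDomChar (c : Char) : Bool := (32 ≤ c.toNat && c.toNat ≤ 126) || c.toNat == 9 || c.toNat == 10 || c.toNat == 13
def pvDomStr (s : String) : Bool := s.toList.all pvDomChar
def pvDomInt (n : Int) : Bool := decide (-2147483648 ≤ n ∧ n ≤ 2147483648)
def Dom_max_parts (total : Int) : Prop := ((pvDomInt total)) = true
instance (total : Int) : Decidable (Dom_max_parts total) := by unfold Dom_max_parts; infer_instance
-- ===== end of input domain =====

-- B replaces A's powers-of-7 list + reverse + high-to-low greedy subtraction by a
-- low-to-high base-7 digit loop (% and //); same return value, simpler code.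

-- ===== PORT A =====
-- while power <= total: powers_of_7.append(power); power *= 7
-- (the `1 ≤ power` conjunct only makes the recursion total; power starts at 1 and only grows)
def genPowers (total power : Int) : List Int :=
  if h : 1 ≤ power ∧ power ≤ total then power :: genPowers total (power * 7)
  else []
termination_by (total + 1 - power).toNat
decreasing_by
  have h6 : power + 6 ≤ power * 7 := by nlinarith [h.1]
  omega

-- loop body: count = min(5, total // value); total -= count*value; result += count
def greedyStep (acc : Int × Int) (value : Int) : Int × Int :=
  let count := min 5 (PySem.Int.floordiv acc.1 value)
  (acc.1 - count * value, acc.2 + count)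

def max_parts (total : Int) : Int :=
  let powers := (genPowers total 1).reverse
  let st := powers.foldl greedyStep (total, 0)
  if st.1 = 0 then st.2 else -1

-- ===== PORT B =====
-- while total > 0: d = total % 7; if d == 6: return -1; result += d; total //= 7
def digitLoop (total result : Int) : Int :=
  if h : 0 < total then
    let d := PySem.Int.mod total 7
    if d = 6 then -1
    else digitLoop (PySem.Int.floordiv total 7) (result + d)
  else result
termination_by total.toNat
decreasing_by
  have h1 : PySem.Int.floordiv total 7 < total := by
    rw [PySem.Int.floordiv_lt_iff_lt_mul (by norm_num)]
    nlinarith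
  have h2 : 0 ≤ PySem.Int.floordiv total 7 := by
    rw [PySem.Int.floordiv_eq_ediv_of_pos (by norm_num)]
    exact Int.ediv_nonneg (le_of_lt h) (by norm_num)
  omega

def max_parts_alt (total : Int) : Int :=
  if total < 0 then -1 else digitLoop total 0

-- ===== PRECONDITION & SPEC =====
def Spec_max_parts (total : Int) (out : Int) : Prop := out = max_parts_alt total
instance (total : Int) (out : Int) : Decidable (Spec_max_parts total out) := by unfold Spec_max_parts; infer_instance

-- ===== CLAIM (what is proved, stated in full; the proofs are below) =====
def Claim_equal_max_parts : Prop := ∀ (total : Int), Dom_max_parts total → Spec_max_parts total (max_parts total)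

-- ===== LEMMAS AND PROOFS =====

-- reference value: some (sum of base-7 digits) when all digits ≤ 5, else none
def digitSpec (n : Nat) : Option Nat :=
  if n = 0 then some 0
  else if n % 7 = 6 then none
  else (digitSpec (n / 7)).map (· + n % 7)
termination_by n
decreasing_by exact Nat.div_lt_self (by omega) (by norm_num)

-- the reversed powers list [7^(k-1), …, 7, 1]
def revPow : Nat → List Int
  | 0 => []
  | k + 1 => (7:Int)^k :: revPow k

lemma digitSpec_zero : digitSpec 0 = some 0 := by rw [digitSpec]; simp

lemma digitSpec_small (d : Nat) (hd : d ≤ 5) : digitSpec d = some d := by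
  interval_cases d <;> (rw [digitSpec]; norm_num [digitSpec_zero])

lemma digitSpec_split (k d : Nat) (hd : d ≤ 5) :
    ∀ r : Nat, r < 7^k → digitSpec (d * 7^k + r) = (digitSpec r).map (· + d) := by
  induction k with
  | zero =>
    intro r hr
    have hr0 : r = 0 := by simp at hr; omega
    subst hr0
    simp only [pow_zero, mul_one, add_zero]
    rw [digitSpec_zero, digitSpec_small d hd]
    simp
  | succ k ih =>
    intro r hr
    have h7k : 0 < (7:Nat)^k := pow_pos (by norm_num) k
    have hpow : (7:Nat)^(k+1) = 7^k * 7 := pow_succ 7 k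
    by_cases hn : d * 7^(k+1) + r = 0
    · have hr0 : r = 0 := by omega
      have hd0 : d = 0 := by
        rcases Nat.mul_eq_zero.mp (by omega : d * 7^(k+1) = 0) with h | h
        · exact h
        · omega
      subst hr0; subst hd0
      simp [digitSpec_zero]
    · have hmod : (d * 7^(k+1) + r) % 7 = r % 7 := by
        rw [show d * 7^(k+1) + r = r + d * 7^k * 7 by rw [hpow]; ring,
          Nat.add_mul_mod_self_right]
      have hdiv : (d * 7^(k+1) + r) / 7 = d * 7^k + r / 7 := by
        rw [show d * 7^(k+1) + r = r + d * 7^k * 7 by rw [hpow]; ring,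
          Nat.add_mul_div_right _ _ (by norm_num : 0 < 7)]
        omega
      have hrdiv : r / 7 < 7^k := by
        rw [Nat.div_lt_iff_lt_mul (by norm_num : 0 < 7)]
        omega
      rw [digitSpec]
      simp only [if_neg hn, hmod, hdiv]
      by_cases h6 : r % 7 = 6
      · have hr0 : r ≠ 0 := by omega
        conv_rhs => rw [digitSpec]
        simp [hr0, h6]
      · rw [if_neg h6, ih (r / 7) hrdiv]
        by_cases hr0 : r = 0
        · subst hr0
          simp [digitSpec_zero]
        · conv_rhs => rw [digitSpec]
          rw [if_neg hr0, if_neg h6]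
          cases hx : digitSpec (r / 7) <;> simp [hx] <;> omega

lemma digitSpec_six (k : Nat) : ∀ r : Nat, r < 7^k → digitSpec (6 * 7^k + r) = none := by
  induction k with
  | zero =>
    intro r hr
    have hr0 : r = 0 := by simp at hr; omega
    subst hr0
    rw [digitSpec]
    norm_num
  | succ k ih =>
    intro r hr
    have h7k : 0 < (7:Nat)^k := pow_pos (by norm_num) k
    have hpow : (7:Nat)^(k+1) = 7^k * 7 := pow_succ 7 k
    have hn : 6 * 7^(k+1) + r ≠ 0 := by
      have : 0 < (7:Nat)^(k+1) := pow_pos (by norm_num) (k+1)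
      omega
    have hmod : (6 * 7^(k+1) + r) % 7 = r % 7 := by
      rw [show 6 * 7^(k+1) + r = r + 6 * 7^k * 7 by rw [hpow]; ring,
        Nat.add_mul_mod_self_right]
    have hdiv : (6 * 7^(k+1) + r) / 7 = 6 * 7^k + r / 7 := by
      rw [show 6 * 7^(k+1) + r = r + 6 * 7^k * 7 by rw [hpow]; ring,
        Nat.add_mul_div_right _ _ (by norm_num : 0 < 7)]
      omega
    have hrdiv : r / 7 < 7^k := by
      rw [Nat.div_lt_iff_lt_mul (by norm_num : 0 < 7)]
      omega
    rw [digitSpec]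
    simp only [if_neg hn, hmod, hdiv]
    by_cases h6 : r % 7 = 6
    · simp [h6]
    · rw [if_neg h6, ih (r / 7) hrdiv]
      simp

lemma digitLoop_eq (n : Nat) : ∀ res : Int,
    digitLoop (n : Int) res = (match digitSpec n with
      | some s => res + (s : Int)
      | none => -1) := by
  induction n using Nat.strong_induction_on with
  | _ n ih =>
    intro res
    by_cases h0 : n = 0
    · subst h0
      rw [digitLoop]
      simp [digitSpec_zero]
    · have hpos : (0:Int) < (n:Int) := by exact_mod_cast Nat.pos_of_ne_zero h0
      have hm : PySem.Int.mod (n:Int) 7 = ((n % 7 : Nat) : Int) := by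
        exact_mod_cast PySem.Int.mod_natCast n 7
      have hf : PySem.Int.floordiv (n:Int) 7 = ((n / 7 : Nat) : Int) := by
        exact_mod_cast PySem.Int.floordiv_natCast n 7
      rw [digitLoop]
      simp only [dif_pos hpos, hm, hf]
      by_cases h6 : n % 7 = 6
      · have : digitSpec n = none := by rw [digitSpec]; simp [h0, h6]
        simp [this, h6]
      · have hne : ((n % 7 : Nat) : Int) ≠ 6 := by exact_mod_cast h6
        rw [if_neg hne,
          ih (n / 7) (Nat.div_lt_self (Nat.pos_of_ne_zero h0) (by norm_num)) (res + ((n % 7 : Nat) : Int))]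
        have hunf : digitSpec n = (digitSpec (n / 7)).map (· + n % 7) := by
          rw [digitSpec]; simp [h0, h6]
        rw [hunf]
        cases hx : digitSpec (n / 7) <;> simp [hx] <;> push_cast <;> ring

lemma bad_inv (k : Nat) : ∀ r res : Int, (7:Int)^k ≤ r →
    1 ≤ ((revPow k).foldl greedyStep (r, res)).1 := by
  induction k with
  | zero => intro r res h; simpa [revPow] using h
  | succ k ih =>
    intro r res h
    have hp : (0:Int) < 7^k := pow_pos (by norm_num) k
    have hs : (7:Int)^(k+1) = 7^k * 7 := pow_succ 7 k
    have hq : (7:Int) ≤ PySem.Int.floordiv r (7^k) := by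
      rw [PySem.Int.le_floordiv_iff_mul_le hp]
      linarith
    have hc : min (5:Int) (PySem.Int.floordiv r (7^k)) = 5 := min_eq_left (by linarith)
    simp only [revPow, List.foldl_cons]
    have hg : greedyStep (r, res) ((7:Int)^k) = (r - 5 * 7^k, res + 5) := by
      simp only [greedyStep, hc]
    rw [hg]
    exact ih _ _ (by linarith)

lemma good_fold (k : Nat) : ∀ (n : Nat) (res : Int) (s : Nat), n < 7^k →
    digitSpec n = some s →
    (revPow k).foldl greedyStep ((n : Int), res) = (0, res + (s : Int)) := by
  induction k with
  | zero =>
    intro n res s hn hs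
    have hn0 : n = 0 := by simp at hn; omega
    subst hn0
    rw [digitSpec_zero] at hs
    simp only [Option.some.injEq] at hs
    subst hs
    simp [revPow]
  | succ k ih =>
    intro n res s hn hs
    have h7k : 0 < (7:Nat)^k := pow_pos (by norm_num) k
    have hpow : (7:Nat)^(k+1) = 7^k * 7 := pow_succ 7 k
    have hc7 : ((7^k : Nat) : Int) = (7:Int)^k := by push_cast; ring
    have hsplitn : n = n / 7^k * 7^k + n % 7^k := by
      rw [Nat.mul_comm]
      exact (Nat.div_add_mod n (7^k)).symm
    have hm : n % 7^k < 7^k := Nat.mod_lt _ h7k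
    have hd6 : n / 7^k ≤ 6 := by
      have : n / 7^k < 7 := by
        rw [Nat.div_lt_iff_lt_mul h7k]
        omega
      omega
    have hfd : PySem.Int.floordiv (n:Int) ((7:Int)^k) = ((n / 7^k : Nat) : Int) := by
      have := PySem.Int.floordiv_natCast n (7^k)
      rw [hc7] at this
      exact this
    have hcast : (n : Int) = ((n / 7^k : Nat) : Int) * (7:Int)^k + ((n % 7^k : Nat) : Int) := by
      exact_mod_cast congrArg (Nat.cast (R := Int)) hsplitn
    simp only [revPow, List.foldl_cons]
    by_cases hd5 : n / 7^k ≤ 5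
    · have hmin : min (5:Int) ((n / 7^k : Nat) : Int) = ((n / 7^k : Nat) : Int) :=
        min_eq_right (by exact_mod_cast hd5)
      have hg : greedyStep ((n:Int), res) ((7:Int)^k)
          = (((n % 7^k : Nat) : Int), res + ((n / 7^k : Nat) : Int)) := by
        simp only [greedyStep, hfd, hmin]
        rw [Prod.mk.injEq]
        exact ⟨by linarith [hcast], rfl⟩
      have hsp : digitSpec n = (digitSpec (n % 7^k)).map (· + n / 7^k) := by
        conv_lhs => rw [hsplitn]
        exact digitSpec_split k (n / 7^k) hd5 _ hm
      rw [hsp] at hs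
      obtain ⟨s', hs', hss⟩ : ∃ s', digitSpec (n % 7^k) = some s' ∧ s = s' + n / 7^k := by
        cases hx : digitSpec (n % 7^k) with
        | none => rw [hx] at hs; simp at hs
        | some s' => rw [hx] at hs; simp at hs; exact ⟨s', rfl, hs.symm⟩
      rw [hg, ih (n % 7^k) (res + ((n / 7^k : Nat) : Int)) s' hm hs']
      rw [Prod.mk.injEq]
      refine ⟨rfl, ?_⟩
      subst hss
      push_cast
      ring
    · have hd6' : n / 7^k = 6 := by omega
      have hnone : digitSpec n = none := by
        conv_lhs => rw [hsplitn, hd6']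
        exact digitSpec_six k _ hm
      rw [hnone] at hs
      simp at hs

lemma bad_fold (k : Nat) : ∀ (n : Nat) (res : Int), n < 7^k →
    digitSpec n = none →
    ((revPow k).foldl greedyStep ((n : Int), res)).1 ≠ 0 := by
  induction k with
  | zero =>
    intro n res hn hs
    have hn0 : n = 0 := by simp at hn; omega
    subst hn0
    rw [digitSpec_zero] at hs
    simp at hs
  | succ k ih =>
    intro n res hn hs
    have h7k : 0 < (7:Nat)^k := pow_pos (by norm_num) k
    have hpow : (7:Nat)^(k+1) = 7^k * 7 := pow_succ 7 k
    have hc7 : ((7^k : Nat) : Int) = (7:Int)^k := by push_cast; ring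
    have hsplitn : n = n / 7^k * 7^k + n % 7^k := by
      rw [Nat.mul_comm]
      exact (Nat.div_add_mod n (7^k)).symm
    have hm : n % 7^k < 7^k := Nat.mod_lt _ h7k
    have hfd : PySem.Int.floordiv (n:Int) ((7:Int)^k) = ((n / 7^k : Nat) : Int) := by
      have := PySem.Int.floordiv_natCast n (7^k)
      rw [hc7] at this
      exact this
    have hcast : (n : Int) = ((n / 7^k : Nat) : Int) * (7:Int)^k + ((n % 7^k : Nat) : Int) := by
      exact_mod_cast congrArg (Nat.cast (R := Int)) hsplitn
    simp only [revPow, List.foldl_cons]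
    by_cases hd5 : n / 7^k ≤ 5
    · have hmin : min (5:Int) ((n / 7^k : Nat) : Int) = ((n / 7^k : Nat) : Int) :=
        min_eq_right (by exact_mod_cast hd5)
      have hg : greedyStep ((n:Int), res) ((7:Int)^k)
          = (((n % 7^k : Nat) : Int), res + ((n / 7^k : Nat) : Int)) := by
        simp only [greedyStep, hfd, hmin]
        rw [Prod.mk.injEq]
        exact ⟨by linarith [hcast], rfl⟩
      have hsp : digitSpec n = (digitSpec (n % 7^k)).map (· + n / 7^k) := by
        conv_lhs => rw [hsplitn]
        exact digitSpec_split k (n / 7^k) hd5 _ hm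
      rw [hsp] at hs
      have hnone : digitSpec (n % 7^k) = none := by
        cases hx : digitSpec (n % 7^k) with
        | none => rfl
        | some s' => rw [hx] at hs; simp at hs
      rw [hg]
      exact ih (n % 7^k) _ hm hnone
    · have hd6' : n / 7^k = 6 := by
        have h7 : n / 7^k < 7 := by
          rw [Nat.div_lt_iff_lt_mul h7k]
          omega
        omega
      have hmin : min (5:Int) ((n / 7^k : Nat) : Int) = 5 := by
        rw [hd6']
        norm_num
      have hg : greedyStep ((n:Int), res) ((7:Int)^k) = ((n:Int) - 5 * 7^k, res + 5) := by
        simp only [greedyStep, hfd, hmin]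
      have hge : (7:Int)^k ≤ (n:Int) - 5 * 7^k := by
        rw [hd6'] at hcast
        have : ((6:Nat) : Int) = (6:Int) := by norm_num
        have h60 : (0:Int) ≤ ((n % 7^k : Nat) : Int) := by positivity
        rw [this] at hcast
        linarith
      rw [hg]
      have := bad_inv k ((n:Int) - 5 * 7^k) (res + 5) hge
      omega

lemma genPowers_eq : ∀ (k j : Nat) (t : Int), t < 7^(j+k) →
    (∀ i, i < k → (7:Int)^(j+i) ≤ t) →
    genPowers t ((7:Int)^j) = (List.range' j k).map (fun i => (7:Int)^i) := by
  intro k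
  induction k with
  | zero =>
    intro j t h1 _
    rw [genPowers, dif_neg (by rintro ⟨-, hle⟩; rw [Nat.add_zero] at h1; linarith)]
    simp
  | succ k ih =>
    intro j t h1 h2
    have hp0 : (0:Int) < 7^j := pow_pos (by norm_num) j
    have hle : (7:Int)^j ≤ t := by simpa using h2 0 (by omega)
    rw [genPowers, dif_pos ⟨by omega, hle⟩]
    have h7 : (7:Int)^j * 7 = 7^(j+1) := (pow_succ 7 j).symm
    have h1' : t < 7^((j+1)+k) := by
      have e : j + (k+1) = (j+1) + k := by omega
      rw [e] at h1
      exact h1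
    have h2' : ∀ i, i < k → (7:Int)^((j+1)+i) ≤ t := by
      intro i hi
      have e : j + (i+1) = (j+1) + i := by omega
      have := h2 (i+1) (by omega)
      rw [e] at this
      exact this
    rw [h7, ih (j+1) t h1' h2']
    simp [List.range'_succ]

lemma revPow_eq (k : Nat) :
    revPow k = (((List.range k).map (fun i => (7:Int)^i)).reverse) := by
  induction k with
  | zero => simp [revPow]
  | succ k ih => simp [revPow, List.range_succ, ih]

-- ===== VERDICT (by name: the statement is the Claim_ definition above) =====
theorem max_parts_spec : Claim_equal_max_parts := by
  intro t _
  unfold Spec_max_parts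
  rcases lt_trichotomy t 0 with hneg | hzero | hpos
  · simp only [max_parts, max_parts_alt]
    rw [genPowers, dif_neg (by rintro ⟨-, h1t⟩; omega)]
    simp [hneg, show t ≠ 0 from by omega]
  · subst hzero
    have hB : digitLoop 0 0 = 0 := by rw [digitLoop]; norm_num
    simp only [max_parts, max_parts_alt]
    rw [genPowers, dif_neg (by rintro ⟨-, h1t⟩; omega)]
    simp [hB]
  · have hn1 : 1 ≤ t.toNat := by omega
    have htn : (t.toNat : Int) = t := Int.toNat_of_nonneg (le_of_lt hpos)
    have hklt : t.toNat < 7^(Nat.log 7 t.toNat + 1) := by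
      simpa using Nat.lt_pow_succ_log_self (by norm_num : 1 < 7) t.toNat
    have hkle : ∀ i, i < Nat.log 7 t.toNat + 1 → 7^i ≤ t.toNat := by
      intro i hi
      calc (7:Nat)^i ≤ 7^(Nat.log 7 t.toNat) := Nat.pow_le_pow_right (by norm_num) (by omega)
        _ ≤ t.toNat := Nat.pow_log_le_self 7 (by omega)
    have h1 : t < (7:Int)^(0 + (Nat.log 7 t.toNat + 1)) := by
      rw [Nat.zero_add, ← htn]
      exact_mod_cast hklt
    have h2 : ∀ i, i < Nat.log 7 t.toNat + 1 → (7:Int)^(0+i) ≤ t := by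
      intro i hi
      rw [Nat.zero_add, ← htn]
      exact_mod_cast hkle i hi
    have hgen := genPowers_eq (Nat.log 7 t.toNat + 1) 0 t h1 h2
    rw [pow_zero] at hgen
    have hrev : (genPowers t 1).reverse = revPow (Nat.log 7 t.toNat + 1) := by
      rw [hgen, revPow_eq, ← List.range_eq_range']
    have hnneg : ¬ ((t.toNat : Int) < 0) := by omega
    cases hx : digitSpec t.toNat with
    | some s =>
      have hA := good_fold (Nat.log 7 t.toNat + 1) t.toNat 0 s hklt hx
      have hB : digitLoop (t.toNat : Int) 0 = 0 + (s : Int) := by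
        rw [digitLoop_eq t.toNat 0, hx]
      rw [htn] at hA hB
      simp only [max_parts, max_parts_alt]
      rw [hrev, hA]
      simp [show ¬ t < 0 from by omega, hB]
    | none =>
      have hA := bad_fold (Nat.log 7 t.toNat + 1) t.toNat 0 hklt hx
      have hB : digitLoop (t.toNat : Int) 0 = -1 := by
        rw [digitLoop_eq t.toNat 0, hx]
      rw [htn] at hA hB
      simp only [max_parts, max_parts_alt]
      rw [hrev]
      simp [show ¬ t < 0 from by omega, hB, hA]
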